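-- pv_equiv track=rewrite | github.com/maximeLeurent/botbot | PriceToStr.py | priceToStr
-- ===== SOURCE A (Python) =====
-- def priceToStr( price):
--     kamas = str(price)
--     firstSpace = len(kamas)%3
--     if(kamas and len(kamas)%3 ==0 ):
--         firstSpace = 3
--     textKamas = kamas[0:firstSpace]
--     while firstSpace < len(kamas):
--         textKamas += " " +kamas[firstSpace:firstSpace+3]
--         firstSpace +=3
--     textKamas += " K"
--     return textKamas
-- ===== SOURCE B (Python) =====
-- def priceToStr(price):
--     r = str(price)[::-1]
--     chunks = [r[i:i + 3] for i in range(0, len(r), 3)]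
--     return " ".join(chunks)[::-1] + " K"
-- ===== Notes on version B (the rewrite author's own statement) =====
-- stated objective: alternative
-- what changed: A walks str(price) left-to-right with a computed ragged first group and an index while-loop; B reverses the string, slices it into uniform three-character chunks from the front, joins them with spaces and reverses back.
import Mathlib
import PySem

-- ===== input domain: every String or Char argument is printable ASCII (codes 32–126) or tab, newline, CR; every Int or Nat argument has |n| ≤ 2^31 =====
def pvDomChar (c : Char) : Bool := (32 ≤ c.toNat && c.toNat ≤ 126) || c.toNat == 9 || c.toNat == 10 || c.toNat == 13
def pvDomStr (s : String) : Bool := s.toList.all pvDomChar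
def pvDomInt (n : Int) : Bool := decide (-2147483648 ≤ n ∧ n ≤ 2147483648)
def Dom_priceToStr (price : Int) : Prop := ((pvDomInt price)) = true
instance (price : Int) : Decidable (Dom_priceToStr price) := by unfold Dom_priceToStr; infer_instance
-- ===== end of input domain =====

-- B replaces A's left-to-right walk (ragged first group + index while-loop) by
-- reverse / uniform chunking / join / reverse-back; alternative decomposition, same cost.


-- ===== PORT A =====
-- the Python while-loop: textKamas += " " + kamas[firstSpace:firstSpace+3]; firstSpace += 3
def priceToStrLoopA (kamas : List Char) (textKamas : List Char) (firstSpace : Int) :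
    List Char :=
  if firstSpace < (kamas.length : Int) then
    priceToStrLoopA kamas
      (textKamas ++ ' ' :: PySem.List.slice kamas (some firstSpace) (some (firstSpace + 3)))
      (firstSpace + 3)
  else textKamas
termination_by ((kamas.length : Int) - firstSpace).toNat
decreasing_by omega

def priceToStr (price : Int) : String :=
  let kamas := PySem.Int.toChars price                         -- kamas = str(price)
  let firstSpace : Int := PySem.Int.mod (kamas.length : Int) 3 -- firstSpace = len(kamas)%3
  let firstSpace : Int :=                                      -- if kamas and len(kamas)%3 == 0
    if kamas ≠ [] ∧ PySem.Int.mod (kamas.length : Int) 3 = 0 then 3 else firstSpace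
  let textKamas := PySem.List.slice kamas (some 0) (some firstSpace)  -- kamas[0:firstSpace]
  String.ofList (priceToStrLoopA kamas textKamas firstSpace ++ [' ', 'K'])  -- loop; += " K"

-- ===== PORT B =====
def priceToStr_alt (price : Int) : String :=
  let r := (PySem.Int.toChars price).reverse                   -- str(price)[::-1] (slice?_none_none_neg_one)
  let chunks := (PySem.List.pyRange 0 (r.length : Int) 3).map  -- [r[i:i+3] for i in range(0, len(r), 3)]
    (fun i => PySem.List.slice r (some i) (some (i + 3)))
  -- " ".join(chunks) ported as intersperse-with-" " then flatten (exact for join on char lists)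
  String.ofList ((chunks.intersperse [' ']).flatten.reverse ++ [' ', 'K'])

-- ===== PRECONDITION & SPEC =====
def Spec_priceToStr (price : Int) (out : String) : Prop := out = priceToStr_alt price
instance (price : Int) (out : String) : Decidable (Spec_priceToStr price out) := by unfold Spec_priceToStr; infer_instance

-- ===== CLAIM (what is proved, stated in full; the proofs are below) =====
def Claim_equal_priceToStr : Prop := ∀ (price : Int), Dom_priceToStr price → Spec_priceToStr price (priceToStr price)

-- ===== LEMMAS AND PROOFS =====

-- pure (no-accumulator) form of A's loop
def loopP (kamas : List Char) (i : Int) : List Char :=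
  if i < (kamas.length : Int) then
    ' ' :: PySem.List.slice kamas (some i) (some (i + 3)) ++ loopP kamas (i + 3)
  else []
termination_by ((kamas.length : Int) - i).toNat
decreasing_by omega

lemma loopA_eq_aux (k : List Char) :
    ∀ (n : Nat) (acc : List Char) (i : Int), ((k.length : Int) - i).toNat ≤ n →
      priceToStrLoopA k acc i = acc ++ loopP k i := by
  intro n
  induction n with
  | zero =>
      intro acc i h
      rw [priceToStrLoopA, loopP]
      have hni : ¬ i < (k.length : Int) := by omega
      simp [hni]
  | succ n ih =>
      intro acc i h
      rw [priceToStrLoopA, loopP]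
      split
      · next hlt =>
          rw [ih _ _ (by omega)]
          simp
      · simp

lemma loopP_stop (k : List Char) (i : Int) (h : ¬ i < (k.length : Int)) : loopP k i = [] := by
  rw [loopP]; simp [h]

lemma loopP_go (k : List Char) (i : Int) (h : i < (k.length : Int)) :
    loopP k i = ' ' :: PySem.List.slice k (some i) (some (i + 3)) ++ loopP k (i + 3) := by
  rw [loopP]; simp [h]

lemma loopA_eq (k acc : List Char) (i : Int) :
    priceToStrLoopA k acc i = acc ++ loopP k i :=
  loopA_eq_aux k ((k.length : Int) - i).toNat acc i le_rfl

-- A's grouped string (without the trailing " K")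
def agrp (s : List Char) : List Char :=
  let f : Int :=
    if s ≠ [] ∧ PySem.Int.mod (s.length : Int) 3 = 0 then 3
    else PySem.Int.mod (s.length : Int) 3
  PySem.List.slice s (some 0) (some f) ++ loopP s f

-- B's chunk list and grouped string (without the trailing " K")
def chunksB (r : List Char) : List (List Char) :=
  (PySem.List.pyRange 0 (r.length : Int) 3).map
    (fun i => PySem.List.slice r (some i) (some (i + 3)))

def bgrp (s : List Char) : List Char :=
  ((chunksB s.reverse).intersperse [' ']).flatten.reverse

-- recursive uniform chunking from the front
def chunksRec (l : List Char) : List (List Char) :=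
  if l = [] then [] else l.take 3 :: chunksRec (l.drop 3)
termination_by l.length
decreasing_by
  rename_i h
  have : l.length ≠ 0 := by simpa using (List.length_pos_iff.mpr h).ne'
  simp [List.length_drop]; omega

lemma pyRange_three_cons (a b : Int) (h : a < b) :
    PySem.List.pyRange a b 3 = a :: PySem.List.pyRange (a + 3) b 3 := by
  rw [PySem.List.pyRange_of_pos a b (by norm_num),
      PySem.List.pyRange_of_pos (a + 3) b (by norm_num)]
  have hc : (if a < b then ((b - a + 3 - 1) / 3).toNat else 0)
      = ((if a + 3 < b then ((b - (a + 3) + 3 - 1) / 3).toNat else 0)) + 1 := by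
    split_ifs <;> omega
  rw [hc, List.range_succ_eq_map, List.map_cons, List.map_map]
  refine congrArg₂ List.cons (by simp) ?_
  refine List.map_congr_left (fun k _ => ?_)
  simp [Function.comp, Nat.succ_eq_add_one]
  ring

lemma pyRange_three_shift (b : Int) :
    PySem.List.pyRange 3 b 3 = (PySem.List.pyRange 0 (b - 3) 3).map (· + 3) := by
  rw [PySem.List.pyRange_of_pos 3 b (by norm_num),
      PySem.List.pyRange_of_pos 0 (b - 3) (by norm_num), List.map_map]
  have hc : (if (3:Int) < b then ((b - 3 + 3 - 1) / 3).toNat else 0)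
      = (if (0:Int) < b - 3 then ((b - 3 - 0 + 3 - 1) / 3).toNat else 0) := by
    split_ifs <;> omega
  rw [hc]
  refine List.map_congr_left (fun k _ => ?_)
  simp [Function.comp]; ring

lemma chunksB_eq_aux : ∀ (n : Nat) (r : List Char), r.length ≤ n → chunksB r = chunksRec r := by
  intro n
  induction n with
  | zero =>
      intro r h
      have hr : r = [] := List.eq_nil_of_length_eq_zero (by omega)
      subst hr
      rw [chunksB, chunksRec]
      simp [PySem.List.pyRange]
  | succ n ih =>
      intro r h
      by_cases hr : r = []
      · subst hr
        rw [chunksB, chunksRec]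
        simp [PySem.List.pyRange]
      · have hlen : 0 < r.length := List.length_pos_iff.mpr hr
        rw [chunksB, chunksRec, if_neg hr,
            pyRange_three_cons 0 (r.length : Int) (by exact_mod_cast hlen)]
        rw [List.map_cons]
        refine congrArg₂ List.cons ?_ ?_
        · rw [PySem.List.slice_toNat r (a := 0) (b := 0 + 3) (by norm_num) (by norm_num)]
          simp
        · rw [show ((0:Int) + 3) = 3 from rfl, pyRange_three_shift, List.map_map]
          by_cases hr3 : r.length ≤ 3
          · have hnil : r.drop 3 = [] := List.drop_eq_nil_of_le hr3
            have hneg : ¬ ((0:Int) < (r.length : Int) - 3) := by omega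
            rw [hnil, chunksRec,
                PySem.List.pyRange_of_pos 0 ((r.length : Int) - 3) (by norm_num)]
            simp
            omega
          · rw [← ih (r.drop 3) (by simp only [List.length_drop]; omega)]
            rw [chunksB]
            have hlen3 : (((r.drop 3).length : Nat) : Int) = (r.length : Int) - 3 := by
              simp only [List.length_drop]; omega
            rw [hlen3]
            refine List.map_congr_left (fun i hi => ?_)
            have hi0 : 0 ≤ i := by
              have hm := (PySem.List.mem_pyRange_iff_of_pos (a := 0) (b := (r.length : Int) - 3)
                (s := 3) (by norm_num) i).mp hi
              omega
            simp only [Function.comp]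
            rw [PySem.List.slice_toNat r (a := i + 3) (b := i + 3 + 3) (by omega) (by omega),
                PySem.List.slice_toNat (r.drop 3) (a := i) (b := i + 3) (by omega) (by omega),
                List.drop_drop]
            have h2 : (i + 3 + 3).toNat - (i + 3).toNat = 3 := by omega
            have h3 : (i + 3).toNat - i.toNat = 3 := by omega
            have h1 : (i + 3).toNat = 3 + i.toNat := by omega
            rw [h2, h3, h1]

lemma chunksB_eq (r : List Char) : chunksB r = chunksRec r :=
  chunksB_eq_aux r.length r le_rfl

lemma bgrp_eq_rec (s : List Char) :
    bgrp s = ((chunksRec s.reverse).intersperse [' ']).flatten.reverse := by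
  rw [bgrp, chunksB_eq]

lemma chunksRec_ne_nil (l : List Char) (h : l ≠ []) : chunksRec l ≠ [] := by
  rw [chunksRec]; simp [h]

lemma joinSp_cons (a : List Char) (rest : List (List Char)) (h : rest ≠ []) :
    ((a :: rest).intersperse [' ']).flatten = a ++ ' ' :: (rest.intersperse [' ']).flatten := by
  cases rest with
  | nil => exact absurd rfl h
  | cons b l => simp [List.intersperse]

lemma loopP_split :
    ∀ (n : Nat) (t u : List Char) (i : Int), u.length = 3 → 0 ≤ i →
      i ≤ (t.length : Int) → (3 : Int) ∣ ((t.length : Int) - i) →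
      ((t.length : Int) - i).toNat ≤ n →
      loopP (t ++ u) i = loopP t i ++ ' ' :: u := by
  intro n
  induction n with
  | zero =>
      intro t u i hu h0 hle hdvd hn
      have hi : i = (t.length : Int) := by omega
      subst hi
      have h1 : (t.length : Int) < ((t ++ u).length : Int) := by simp [hu]
      have h2 : ¬ ((t.length : Int) + 3 < ((t ++ u).length : Int)) := by simp [hu]
      have h3 : ¬ ((t.length : Int) < (t.length : Int)) := lt_irrefl _
      rw [loopP_go (t ++ u) _ h1, loopP_stop (t ++ u) _ h2, loopP_stop t _ h3]
      rw [PySem.List.slice_toNat (t ++ u) (a := (t.length : Int)) (b := (t.length : Int) + 3)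
        (by omega) (by omega)]
      have hd : List.drop ((t.length : Int)).toNat (t ++ u) = u := by simp
      have h4 : ((t.length : Int) + 3).toNat - ((t.length : Int)).toNat = 3 := by omega
      rw [hd, h4, List.take_of_length_le (by omega)]
      simp
  | succ n ih =>
      intro t u i hu h0 hle hdvd hn
      by_cases hi : i = (t.length : Int)
      · -- same as the base case
        subst hi
        have h1 : (t.length : Int) < ((t ++ u).length : Int) := by simp [hu]
        have h2 : ¬ ((t.length : Int) + 3 < ((t ++ u).length : Int)) := by simp [hu]
        have h3 : ¬ ((t.length : Int) < (t.length : Int)) := lt_irrefl _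
        rw [loopP_go (t ++ u) _ h1, loopP_stop (t ++ u) _ h2, loopP_stop t _ h3]
        rw [PySem.List.slice_toNat (t ++ u) (a := (t.length : Int)) (b := (t.length : Int) + 3)
          (by omega) (by omega)]
        have hd : List.drop ((t.length : Int)).toNat (t ++ u) = u := by simp
        have h4 : ((t.length : Int) + 3).toNat - ((t.length : Int)).toNat = 3 := by omega
        rw [hd, h4, List.take_of_length_le (by omega)]
        simp
      · have hlt : i < (t.length : Int) := lt_of_le_of_ne hle hi
        have hstep : i + 3 ≤ (t.length : Int) := by omega
        have h1 : i < ((t ++ u).length : Int) := by simp; omega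
        rw [loopP_go (t ++ u) i h1, loopP_go t i hlt]
        have hsl : PySem.List.slice (t ++ u) (some i) (some (i + 3))
            = PySem.List.slice t (some i) (some (i + 3)) := by
          rw [PySem.List.slice_toNat (t ++ u) (a := i) (b := i + 3) (by omega) (by omega),
              PySem.List.slice_toNat t (a := i) (b := i + 3) (by omega) (by omega),
              List.drop_append_of_le_length (by omega),
              List.take_append_of_le_length (by simp [List.length_drop]; omega)]
        rw [hsl, ih t u (i + 3) hu (by omega) hstep (by omega) (by omega)]
        simp

lemma agrp_small (s : List Char) (h : s.length ≤ 3) : agrp s = s := by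
  rw [agrp]
  have hf : (if s ≠ [] ∧ PySem.Int.mod (s.length : Int) 3 = 0 then (3:Int)
      else PySem.Int.mod (s.length : Int) 3) = (s.length : Int) := by
    rw [show ((s.length : Int)) = ((s.length : Nat) : Int) from rfl]
    rw [show ((3:Int)) = ((3:Nat) : Int) from rfl, PySem.Int.mod_natCast]
    by_cases hs : s = []
    · simp [hs]
    · have h1 : 0 < s.length := List.length_pos_iff.mpr hs
      split_ifs with hc
      · have := hc.2
        have : s.length % 3 = 0 := by exact_mod_cast this
        omega
      · have : ¬ s.length % 3 = 0 := by
          intro h0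
          exact hc ⟨hs, by exact_mod_cast h0⟩
        omega
  rw [hf, loopP, PySem.List.slice_toNat s (a := 0) (b := (s.length : Int))
    (le_refl 0) (Int.natCast_nonneg _)]
  simp

lemma bgrp_small (s : List Char) (h : s.length ≤ 3) : bgrp s = s := by
  rw [bgrp_eq_rec]
  by_cases hs : s = []
  · subst hs; rw [chunksRec]; simp
  · rw [chunksRec, if_neg (by simpa using hs)]
    rw [List.take_of_length_le (by simpa using h),
        List.drop_eq_nil_of_le (by simpa using h), chunksRec]
    simp

lemma agrp_step (t u : List Char) (ht : t ≠ []) (hu : u.length = 3) :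
    agrp (t ++ u) = agrp t ++ ' ' :: u := by
  rw [agrp, agrp]
  have hlen : (t ++ u).length = t.length + 3 := by simp [hu]
  have hmod : PySem.Int.mod (((t ++ u).length : Int)) 3 = ((t.length % 3 : Nat) : Int) := by
    rw [hlen, show (((t.length + 3 : Nat)) : Int) = (((t.length + 3 : Nat) : Nat) : Int) from rfl,
        show ((3:Int)) = ((3:Nat) : Int) from rfl, PySem.Int.mod_natCast]
    congr 1
    omega
  have hmodt : PySem.Int.mod ((t.length : Int)) 3 = ((t.length % 3 : Nat) : Int) := by
    rw [show ((3:Int)) = ((3:Nat) : Int) from rfl, PySem.Int.mod_natCast]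
  have htu : t ++ u ≠ [] := by simp [ht]
  -- the two `firstSpace`s coincide
  have hfeq : (if t ++ u ≠ [] ∧ PySem.Int.mod (((t ++ u).length : Int)) 3 = 0 then (3:Int)
        else PySem.Int.mod (((t ++ u).length : Int)) 3)
      = (if t ≠ [] ∧ PySem.Int.mod ((t.length : Int)) 3 = 0 then (3:Int)
        else PySem.Int.mod ((t.length : Int)) 3) := by
    rw [hmod, hmodt]
    simp [htu, ht]
  rw [hfeq]
  set f : Int := (if t ≠ [] ∧ PySem.Int.mod ((t.length : Int)) 3 = 0 then (3:Int)
        else PySem.Int.mod ((t.length : Int)) 3) with hfdef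
  have h0f : 0 ≤ f := by
    rw [hfdef]; split_ifs with hc
    · norm_num
    · rw [hmodt]; positivity
  have hft : f ≤ (t.length : Int) := by
    rw [hfdef]; split_ifs with hc
    · have h0 : t.length % 3 = 0 := by
        have := hc.2; rw [hmodt] at this; exact_mod_cast this
      have h1 : 0 < t.length := List.length_pos_iff.mpr ht
      exact_mod_cast (by omega : (3:Nat) ≤ t.length)
    · rw [hmodt]
      exact_mod_cast Nat.mod_le t.length 3
  have hdvd : (3 : Int) ∣ ((t.length : Int) - f) := by
    rw [hfdef]; split_ifs with hc
    · have h0 : t.length % 3 = 0 := by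
        have := hc.2; rw [hmodt] at this; exact_mod_cast this
      omega
    · rw [hmodt]; omega
  have hsl : PySem.List.slice (t ++ u) (some 0) (some f)
      = PySem.List.slice t (some 0) (some f) := by
    rw [PySem.List.slice_toNat (t ++ u) (a := 0) (b := f) (le_refl 0) h0f,
        PySem.List.slice_toNat t (a := 0) (b := f) (le_refl 0) h0f]
    simp only [Int.toNat_zero, List.drop_zero, Nat.sub_zero]
    exact List.take_append_of_le_length (by omega)
  rw [hsl,
      loopP_split ((t.length : Int) - f).toNat t u f hu h0f hft hdvd le_rfl]
  simp

lemma bgrp_step (t u : List Char) (ht : t ≠ []) (hu : u.length = 3) :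
    bgrp (t ++ u) = bgrp t ++ ' ' :: u := by
  rw [bgrp_eq_rec, bgrp_eq_rec, List.reverse_append]
  rw [chunksRec, if_neg (by simp [ht])]
  rw [List.take_append_of_le_length (by simp [hu]),
      List.take_of_length_le (by simp [hu]),
      List.drop_append_of_le_length (by simp [hu]),
      List.drop_eq_nil_of_le (by simp [hu])]
  simp only [List.nil_append]
  rw [joinSp_cons _ _ (chunksRec_ne_nil _ (by simpa using ht))]
  simp

lemma agrp_eq_bgrp_aux : ∀ (n : Nat) (s : List Char), s.length ≤ n → agrp s = bgrp s := by
  intro n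
  induction n with
  | zero =>
      intro s h
      rw [agrp_small s (by omega), bgrp_small s (by omega)]
  | succ n ih =>
      intro s h
      by_cases hs : s.length ≤ 3
      · rw [agrp_small s hs, bgrp_small s hs]
      · have hsplit : s = s.take (s.length - 3) ++ s.drop (s.length - 3) :=
          (List.take_append_drop _ _).symm
        have ht : s.take (s.length - 3) ≠ [] := by
          intro hnil
          have hlen := congrArg List.length hnil
          simp only [List.length_take, List.length_nil] at hlen
          omega
        have hulen : (s.drop (s.length - 3)).length = 3 := by
          simp [List.length_drop]; omega
        rw [hsplit, agrp_step _ _ ht hulen, bgrp_step _ _ ht hulen,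
            ih _ (by simp [List.length_take]; omega)]

lemma agrp_eq_bgrp (s : List Char) : agrp s = bgrp s :=
  agrp_eq_bgrp_aux s.length s le_rfl

-- ===== VERDICT (by name: the statement is the Claim_ definition above) =====
theorem priceToStr_spec : Claim_equal_priceToStr := by
  intro price _
  unfold Spec_priceToStr priceToStr priceToStr_alt
  simp only [loopA_eq]
  have h := agrp_eq_bgrp (PySem.Int.toChars price)
  unfold agrp bgrp chunksB at h
  simp only [List.length_reverse] at h ⊢
  rw [h]
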